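-- pv_equiv track=rewrite | github.com/ruhandave19/Projects | 4_bit_adder_subtractor/addsub.py | four_bit_adder
-- ===== SOURCE A (Python) =====
-- def half_adder_sum(a,b):
--     return a^b
--
-- def half_adder_carry(a,b):
--     return a&b
--
-- def full_adder_sum(a,b,c):
--     return (a^b)^c
--
-- def full_adder_carry(a,b,c):
--     return ((a^b)&c)|(a&b)
--
-- def four_bit_adder(a,b):
--     bit_list_1 = []
--     bit_list_2 = []
--     p = (4-len(bin(a)[2:]))*"0"+bin(a)[2:]
--     q = (4-len(bin(b)[2:]))*"0"+bin(b)[2:]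
--     for i in p:
--         bit_list_1.append(int(i))
--     for i in q:
--         bit_list_2.append(int(i))
--     output = ""
--     output = str(half_adder_sum(bit_list_1[-1], bit_list_2[-1])) + output
--     output = str(full_adder_sum(bit_list_1[-2], bit_list_2[-2], half_adder_carry(bit_list_1[-1], bit_list_2[-1]))) + output
--     output = str(full_adder_sum(bit_list_1[-3], bit_list_2[-3], full_adder_carry(bit_list_1[-2], bit_list_2[-2], half_adder_carry(bit_list_1[-1], bit_list_2[-1])))) + output
--     output = str(full_adder_sum(bit_list_1[-4], bit_list_2[-4], full_adder_carry(bit_list_1[-3], bit_list_2[-3], full_adder_carry(bit_list_1[-2], bit_list_2[-2], half_adder_carry(bit_list_1[-1], bit_list_2[-1]))))) + output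
--     return output
--
-- a = 1
-- ===== SOURCE B (Python) =====
-- def four_bit_adder(a, b):
--     return format((a + b) % 16, '04b')
-- ===== Notes on version B (the rewrite author's own statement) =====
-- stated objective: simpler
-- what changed: Replaces the string padding/parsing and the unrolled gate-level ripple-carry (xor/and/or half- and full-adder expressions) with one arithmetic expression: format((a+b)%16,'04b').
-- crash fix: On any input with a < 0 or b < 0, A raises ValueError (it tries int('b') on the char of bin()), while B returns format((a+b)%16,'04b'), e.g. '0001' at (-1, 2). — e.g. on four_bit_adder(-1, 2): A raises ValueError, B returns "0001"
import Mathlib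
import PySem

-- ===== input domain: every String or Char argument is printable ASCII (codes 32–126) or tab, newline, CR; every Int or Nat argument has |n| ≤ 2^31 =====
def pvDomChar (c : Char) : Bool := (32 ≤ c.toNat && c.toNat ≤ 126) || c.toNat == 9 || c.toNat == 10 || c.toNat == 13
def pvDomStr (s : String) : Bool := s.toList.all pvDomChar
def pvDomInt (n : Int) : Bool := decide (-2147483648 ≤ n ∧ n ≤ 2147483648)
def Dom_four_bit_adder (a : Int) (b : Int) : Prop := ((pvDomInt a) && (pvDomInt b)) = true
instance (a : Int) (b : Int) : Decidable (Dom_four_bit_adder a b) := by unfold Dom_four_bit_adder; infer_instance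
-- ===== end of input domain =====

-- B replaces the string padding/parsing and gate-level ripple-carry of A with format((a+b)%16,'04b') (simpler).


-- ===== PORT A =====
-- binary digits of a positive Nat, msb first (bin(n)[2:] for n > 0)
def pyBinDigitsAux : Nat → Nat → List Char
  | 0, _ => []
  | fuel+1, n =>
    if n = 0 then []
    else pyBinDigitsAux fuel (n / 2) ++ [if n % 2 = 1 then '1' else '0']

def pyBinDigits (n : Nat) : List Char := pyBinDigitsAux n n

-- bin(n)[2:]: '0' for 0; for negative n Python gives 'b' ++ digits (its chars then fail int(); outside Pre_)
def pyBinTail (n : Int) : List Char :=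
  if n < 0 then 'b' :: pyBinDigits (-n).toNat
  else if n = 0 then ['0'] else pyBinDigits n.toNat

-- int(c): the .getD 0 is the ValueError point (char 'b' of a negative input), excluded by Pre_
def charInt (c : Char) : Int := (PySem.Int.ofChars? [c]).getD 0

def half_adder_sum (a b : Int) : Int := PySem.Int.bxor a b
def half_adder_carry (a b : Int) : Int := PySem.Int.band a b
def full_adder_sum (a b c : Int) : Int := PySem.Int.bxor (PySem.Int.bxor a b) c
def full_adder_carry (a b c : Int) : Int :=
  PySem.Int.bor (PySem.Int.band (PySem.Int.bxor a b) c) (PySem.Int.band a b)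

def four_bit_adder (a : Int) (b : Int) : String :=
  let pd := pyBinTail a
  let qd := pyBinTail b
  let p := List.replicate (4 - pd.length) '0' ++ pd
  let q := List.replicate (4 - qd.length) '0' ++ qd
  let bit_list_1 := p.map charInt
  let bit_list_2 := q.map charInt
  let output := ""
  let output := PySem.Int.toStr (half_adder_sum (PySem.List.pyGetD bit_list_1 (-1) 0) (PySem.List.pyGetD bit_list_2 (-1) 0)) ++ output
  let output := PySem.Int.toStr (full_adder_sum (PySem.List.pyGetD bit_list_1 (-2) 0) (PySem.List.pyGetD bit_list_2 (-2) 0)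
    (half_adder_carry (PySem.List.pyGetD bit_list_1 (-1) 0) (PySem.List.pyGetD bit_list_2 (-1) 0))) ++ output
  let output := PySem.Int.toStr (full_adder_sum (PySem.List.pyGetD bit_list_1 (-3) 0) (PySem.List.pyGetD bit_list_2 (-3) 0)
    (full_adder_carry (PySem.List.pyGetD bit_list_1 (-2) 0) (PySem.List.pyGetD bit_list_2 (-2) 0)
      (half_adder_carry (PySem.List.pyGetD bit_list_1 (-1) 0) (PySem.List.pyGetD bit_list_2 (-1) 0)))) ++ output
  let output := PySem.Int.toStr (full_adder_sum (PySem.List.pyGetD bit_list_1 (-4) 0) (PySem.List.pyGetD bit_list_2 (-4) 0)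
    (full_adder_carry (PySem.List.pyGetD bit_list_1 (-3) 0) (PySem.List.pyGetD bit_list_2 (-3) 0)
      (full_adder_carry (PySem.List.pyGetD bit_list_1 (-2) 0) (PySem.List.pyGetD bit_list_2 (-2) 0)
        (half_adder_carry (PySem.List.pyGetD bit_list_1 (-1) 0) (PySem.List.pyGetD bit_list_2 (-1) 0))))) ++ output
  output

-- ===== PORT B =====
-- format(n, '04b') for 0 ≤ n: binary digits zero-padded on the left to width 4
def fmt04b (n : Int) : String :=
  let ds := if n.toNat = 0 then ['0'] else pyBinDigits n.toNat
  String.ofList (List.replicate (4 - ds.length) '0' ++ ds)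

def four_bit_adder_alt (a : Int) (b : Int) : String :=
  fmt04b (PySem.Int.mod (a + b) 16)

-- ===== PRECONDITION & SPEC =====
-- A raises ValueError on negative a or b (bin() puts 'b' where int() parses); Pre_ excludes exactly those.
def Pre_four_bit_adder (a : Int) (b : Int) : Prop := 0 ≤ a ∧ 0 ≤ b
instance (a : Int) (b : Int) : Decidable (Pre_four_bit_adder a b) := by unfold Pre_four_bit_adder; infer_instance
def pvWitness_four_bit_adder : Int × Int := (3, 5)

-- On inputs with a < 0 or b < 0, A raises ValueError while B returns format((a+b)%16,'04b').
def Raises_four_bit_adder (a : Int) (b : Int) : Prop := a < 0 ∨ b < 0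
instance (a : Int) (b : Int) : Decidable (Raises_four_bit_adder a b) := by unfold Raises_four_bit_adder; infer_instance
def pvRaiseWitness_four_bit_adder : Int × Int := (-1, 2)
def pvRaiseWitnessOut_four_bit_adder : String := "0001"

def Spec_four_bit_adder (a : Int) (b : Int) (out : String) : Prop := out = four_bit_adder_alt a b
instance (a : Int) (b : Int) (out : String) : Decidable (Spec_four_bit_adder a b out) := by unfold Spec_four_bit_adder; infer_instance

-- ===== CLAIM (what is proved, stated in full; the proofs are below) =====
def Claim_equal_four_bit_adder : Prop := ∀ (a : Int) (b : Int), Dom_four_bit_adder a b → Pre_four_bit_adder a b → Spec_four_bit_adder a b (four_bit_adder a b)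
def Claim_raises_four_bit_adder : Prop := (∀ (a : Int) (b : Int), Dom_four_bit_adder a b → Raises_four_bit_adder a b → ¬ Pre_four_bit_adder a b) ∧ (Dom_four_bit_adder (pvRaiseWitness_four_bit_adder.1) (pvRaiseWitness_four_bit_adder.2) ∧ Raises_four_bit_adder (pvRaiseWitness_four_bit_adder.1) (pvRaiseWitness_four_bit_adder.2) ∧ four_bit_adder_alt (pvRaiseWitness_four_bit_adder.1) (pvRaiseWitness_four_bit_adder.2) = pvRaiseWitnessOut_four_bit_adder)

-- ===== LEMMAS AND PROOFS =====

-- bit i (from the lsb) of n, as the Int A's parsed bit lists hold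
def dig (n i : Nat) : Int := ((n / 2^i % 2 : Nat) : Int)

-- the gate cascade of A, abstracted over the eight extracted bits
def gates (x3 x2 x1 x0 y3 y2 y1 y0 : Int) : String :=
  PySem.Int.toStr (full_adder_sum x3 y3 (full_adder_carry x2 y2 (full_adder_carry x1 y1 (half_adder_carry x0 y0)))) ++
  (PySem.Int.toStr (full_adder_sum x2 y2 (full_adder_carry x1 y1 (half_adder_carry x0 y0))) ++
  (PySem.Int.toStr (full_adder_sum x1 y1 (half_adder_carry x0 y0)) ++
  (PySem.Int.toStr (half_adder_sum x0 y0) ++ "")))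

lemma charInt_zero : charInt '0' = 0 := by decide
lemma charInt_one : charInt '1' = 1 := by decide

lemma pyBinDigitsAux_mono : ∀ n f1 f2, n ≤ f1 → n ≤ f2 →
    pyBinDigitsAux f1 n = pyBinDigitsAux f2 n := by
  intro n
  induction n using Nat.strong_induction_on with
  | _ n ih =>
    intro f1 f2 h1 h2
    rcases Nat.eq_zero_or_pos n with h0 | hp
    · subst h0
      cases f1 <;> cases f2 <;> simp [pyBinDigitsAux]
    · obtain ⟨g1, rfl⟩ : ∃ g1, f1 = g1 + 1 := ⟨f1 - 1, by omega⟩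
      obtain ⟨g2, rfl⟩ : ∃ g2, f2 = g2 + 1 := ⟨f2 - 1, by omega⟩
      simp only [pyBinDigitsAux, if_neg (by omega : ¬ n = 0)]
      rw [ih (n / 2) (by omega) g1 g2 (by omega) (by omega)]

lemma pyBinDigits_pos (n : Nat) (h : 0 < n) :
    pyBinDigits n = pyBinDigits (n / 2) ++ [if n % 2 = 1 then '1' else '0'] := by
  unfold pyBinDigits
  obtain ⟨m, rfl⟩ : ∃ m, n = m + 1 := ⟨n - 1, by omega⟩
  rw [show pyBinDigitsAux (m + 1) (m + 1)
      = pyBinDigitsAux m ((m + 1) / 2) ++ [if (m + 1) % 2 = 1 then '1' else '0'] by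
    simp [pyBinDigitsAux]]
  rw [pyBinDigitsAux_mono ((m + 1) / 2) m ((m + 1) / 2) (by omega) (by omega)]

lemma pyBinDigits_getD (n : Nat) :
    ∀ i, ((pyBinDigits n).map charInt).reverse.getD i 0 = dig n i := by
  induction n using Nat.strong_induction_on with
  | _ n ih =>
    intro i
    rcases Nat.eq_zero_or_pos n with h0 | hp
    · subst h0; simp [pyBinDigits, pyBinDigitsAux, dig]
    · rw [pyBinDigits_pos n hp]
      have hrec := ih (n / 2) (Nat.div_lt_self hp (by omega))
      cases i with
      | zero =>
        have h2 : n % 2 = 0 ∨ n % 2 = 1 := by omega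
        rcases h2 with h | h <;>
          simp [dig, h, charInt_zero, charInt_one, List.reverse_append]
      | succ j =>
        simp only [List.map_append, List.reverse_append, List.map_cons, List.map_nil,
          List.reverse_cons, List.reverse_nil, List.nil_append, List.cons_append,
          List.getD_cons_succ]
        rw [hrec j]
        simp [dig, Nat.div_div_eq_div_mul, pow_succ, Nat.mul_comm]

lemma pyBinDigits_lt (n : Nat) : n < 2 ^ (pyBinDigits n).length := by
  induction n using Nat.strong_induction_on with
  | _ n ih =>
    rcases Nat.eq_zero_or_pos n with h0 | hp
    · subst h0; simp [pyBinDigits, pyBinDigitsAux]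
    · rw [pyBinDigits_pos n hp]
      have := ih (n / 2) (Nat.div_lt_self hp (by omega))
      simp only [List.length_append, List.length_cons, List.length_nil]
      have : n / 2 < 2 ^ (pyBinDigits (n / 2)).length := this
      rw [pow_succ]
      omega

-- bin(n)[2:] for n ≥ 0 (with the 0 → "0" case folded in)
def binTailNat (n : Nat) : List Char := if n = 0 then ['0'] else pyBinDigits n

lemma binTailNat_getD (n : Nat) :
    ∀ i, ((binTailNat n).map charInt).reverse.getD i 0 = dig n i := by
  intro i
  unfold binTailNat
  split
  · subst ‹n = 0›
    cases i <;> simp [dig, charInt_zero]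
  · exact pyBinDigits_getD n i

lemma binTailNat_lt (n : Nat) : n < 2 ^ (binTailNat n).length := by
  unfold binTailNat
  split
  · simp [‹n = 0›]
  · exact pyBinDigits_lt n

lemma binTailNat_ne_nil (n : Nat) : (binTailNat n).length ≠ 0 := by
  unfold binTailNat
  split
  · simp
  · intro h
    have hlt := pyBinDigits_lt n
    rw [h, pow_zero] at hlt
    omega

lemma getD_replicate_zero (m j : Nat) : (List.replicate m (0 : Int)).getD j 0 = 0 := by
  induction m generalizing j with
  | zero => simp
  | succ k ih =>
    cases j with
    | zero => simp
    | succ j' => simpa using ih j'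

-- the padded, parsed bit list of A for a nonnegative value n
def bitsOf (n : Nat) : List Int :=
  (List.replicate (4 - (binTailNat n).length) '0' ++ binTailNat n).map charInt

lemma bitsOf_length (n : Nat) : 4 ≤ (bitsOf n).length := by
  unfold bitsOf
  simp only [List.length_map, List.length_append, List.length_replicate]
  have := binTailNat_ne_nil n
  omega

lemma bitsOf_rev_getD (n : Nat) (i : Nat) : (bitsOf n).reverse.getD i 0 = dig n i := by
  unfold bitsOf
  rw [List.map_append, List.reverse_append]
  by_cases hi : i < ((binTailNat n).map charInt).reverse.length
  · rw [List.getD_append _ _ _ _ hi]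
    exact binTailNat_getD n i
  · push_neg at hi
    rw [List.getD_append_right _ _ _ _ hi]
    have hlen : (binTailNat n).length ≤ i := by
      simpa using hi
    have hn : n < 2 ^ i := lt_of_lt_of_le (binTailNat_lt n)
      (Nat.pow_le_pow_right (by omega) hlen)
    have hdig : dig n i = 0 := by
      unfold dig
      rw [Nat.div_eq_of_lt hn]
      simp
    rw [hdig]
    have hrep : (((List.replicate (4 - (binTailNat n).length) '0').map charInt).reverse)
        = List.replicate (4 - (binTailNat n).length) (0 : Int) := by
      simp [List.map_replicate, charInt_zero]
    rw [hrep]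
    exact getD_replicate_zero _ _

-- negative indexing into a list of length ≥ 4 reads the reversed list
lemma pyGetD_neg_rev (xs : List Int) (k : Nat) (hk0 : 0 < k) (hk : k ≤ xs.length) :
    PySem.List.pyGetD xs (-(k : Int)) 0 = xs.reverse.getD (k - 1) 0 := by
  rw [PySem.List.pyGetD_neg_natCast _ _ _ hk0 hk]
  have h1 : k - 1 < xs.reverse.length := by simp; omega
  rw [List.getD_eq_getElem _ _ h1]
  rw [List.getElem_reverse]
  congr 1
  have hlr : xs.reverse.length = xs.length := List.length_reverse
  omega

lemma bitsOf_pyGetD (n : Nat) (k : Nat) (hk0 : 0 < k) (hk4 : k ≤ 4) :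
    PySem.List.pyGetD (bitsOf n) (-(k : Int)) 0 = dig n (k - 1) := by
  rw [pyGetD_neg_rev _ _ hk0 (le_trans hk4 (bitsOf_length n))]
  exact bitsOf_rev_getD n (k - 1)

-- A on a nonnegative pair is the gate cascade over the low four bits
lemma four_bit_adder_eq_gates (a b : Int) (ha : 0 ≤ a) (hb : 0 ≤ b) :
    four_bit_adder a b =
      gates (dig a.toNat 3) (dig a.toNat 2) (dig a.toNat 1) (dig a.toNat 0)
            (dig b.toNat 3) (dig b.toNat 2) (dig b.toNat 1) (dig b.toNat 0) := by
  have hA : pyBinTail a = binTailNat a.toNat := by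
    unfold pyBinTail binTailNat
    rw [if_neg (by omega)]
    by_cases h : a = 0
    · simp [h]
    · rw [if_neg h, if_neg (by omega)]
  have hB : pyBinTail b = binTailNat b.toNat := by
    unfold pyBinTail binTailNat
    rw [if_neg (by omega)]
    by_cases h : b = 0
    · simp [h]
    · rw [if_neg h, if_neg (by omega)]
  show four_bit_adder a b = _
  unfold four_bit_adder
  simp only [hA, hB]
  have e1 := bitsOf_pyGetD a.toNat 1 (by omega) (by omega)
  have e2 := bitsOf_pyGetD a.toNat 2 (by omega) (by omega)
  have e3 := bitsOf_pyGetD a.toNat 3 (by omega) (by omega)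
  have e4 := bitsOf_pyGetD a.toNat 4 (by omega) (by omega)
  have f1 := bitsOf_pyGetD b.toNat 1 (by omega) (by omega)
  have f2 := bitsOf_pyGetD b.toNat 2 (by omega) (by omega)
  have f3 := bitsOf_pyGetD b.toNat 3 (by omega) (by omega)
  have f4 := bitsOf_pyGetD b.toNat 4 (by omega) (by omega)
  have hba : List.map charInt (List.replicate (4 - (binTailNat a.toNat).length) '0' ++ binTailNat a.toNat)
      = bitsOf a.toNat := rfl
  have hbb : List.map charInt (List.replicate (4 - (binTailNat b.toNat).length) '0' ++ binTailNat b.toNat)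
      = bitsOf b.toNat := rfl
  rw [hba, hbb]
  rw [show ((-1 : Int) = -((1 : Nat) : Int)) by norm_num,
      show ((-2 : Int) = -((2 : Nat) : Int)) by norm_num,
      show ((-3 : Int) = -((3 : Nat) : Int)) by norm_num,
      show ((-4 : Int) = -((4 : Nat) : Int)) by norm_num]
  rw [e1, e2, e3, e4, f1, f2, f3, f4]
  rfl

-- the 256-case core: gates on 4-bit values equal the masked-sum format
lemma gates_eq_fmt : ∀ r < 16, ∀ s < 16,
    gates (dig r 3) (dig r 2) (dig r 1) (dig r 0) (dig s 3) (dig s 2) (dig s 1) (dig s 0)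
      = fmt04b (((r + s) % 16 : Nat) : Int) := by decide

lemma dig_mod16 (n : Nat) (i : Nat) (hi : i < 4) : dig n i = dig (n % 16) i := by
  unfold dig
  congr 1
  interval_cases i <;> omega

theorem four_bit_adder_spec : Claim_equal_four_bit_adder := by
  intro a b _ hpre
  obtain ⟨ha, hb⟩ := hpre
  unfold Spec_four_bit_adder
  rw [four_bit_adder_eq_gates a b ha hb]
  rw [dig_mod16 a.toNat 0 (by omega), dig_mod16 a.toNat 1 (by omega),
      dig_mod16 a.toNat 2 (by omega), dig_mod16 a.toNat 3 (by omega),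
      dig_mod16 b.toNat 0 (by omega), dig_mod16 b.toNat 1 (by omega),
      dig_mod16 b.toNat 2 (by omega), dig_mod16 b.toNat 3 (by omega)]
  rw [gates_eq_fmt (a.toNat % 16) (by omega) (b.toNat % 16) (by omega)]
  unfold four_bit_adder_alt
  congr 1
  rw [PySem.Int.mod_eq_emod_of_pos (by omega : (0:Int) < 16)]
  omega

@[simp] theorem four_bit_adder_raises : Claim_raises_four_bit_adder := by
  unfold Claim_raises_four_bit_adder
  constructor
  · intro a b _ hr hpre
    unfold Raises_four_bit_adder at hr
    obtain ⟨ha, hb⟩ := hpre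
    omega
  · exact ⟨by decide, by left; decide, by decide⟩
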